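-- pv_equiv track=rewrite | github.com/renankormann/wordTest-Consecutive-letters | wordTest.py | consec_letters
-- ===== SOURCE A (Python) =====
-- def consec_letters(user_word):
--     # I set the initial condition of the result to be an empty string.
--     result = ""
--
--     # I started a loop that will be testing a letter of the word with the next letter, and the next letter
--     # with the next next letter. I had the set the range of the position of the letters to be the length
--     # of the word minus 2 so it would not pass a position that is not in the string.
--     for pos in range(len(user_word) - 2):
--
--         # This if statement compares the ASCII values of 3 letters. The first letter is the letter in the
--         # position of the loop. Then, if 1 + the ASCII value of the first letter is equal to ASCII of the
--         # second letter, the first statement is true. And, if 1 + the ASCII value of the second letter is equal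
--         # to the ASCII value of the third letter, the second statement is true. Both statements must be true, so
--         # I used "and".
--         if ord(user_word[pos])+1 == ord(user_word[pos+1]) and ord(user_word[pos+1])+1 == ord(user_word[pos+2]):
--             result = "There are three consecutive letters in alphabetical order in the word "
--             break
--
--     # If the result string is still empty, the if statement was not used, therefore there are no consecutive
--     # letters in the word.
--     if result == "":
--         result = "There are NO three consecutive letters in alphabetical order in the word "
--     return result
-- ===== SOURCE B (Python) =====
-- def consec_letters(user_word):
--     # Generate-and-test: for each distinct character c of the word, the word
--     # contains three consecutive ascending characters starting with c exactly
--     # when the 3-char run c, c+1, c+2 occurs as a substring.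
--     for c in set(user_word):
--         if c + chr(ord(c) + 1) + chr(ord(c) + 2) in user_word:
--             return "There are three consecutive letters in alphabetical order in the word "
--     return "There are NO three consecutive letters in alphabetical order in the word "
-- ===== Notes on version B (the rewrite author's own statement) =====
-- stated objective: alternative
-- what changed: B replaces A's positional index loop over ord-triples by generate-and-test: for each distinct character c of the word it builds the candidate run c,chr(ord(c)+1),chr(ord(c)+2) and checks whether that run occurs as a substring of the word.
import Mathlib
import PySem

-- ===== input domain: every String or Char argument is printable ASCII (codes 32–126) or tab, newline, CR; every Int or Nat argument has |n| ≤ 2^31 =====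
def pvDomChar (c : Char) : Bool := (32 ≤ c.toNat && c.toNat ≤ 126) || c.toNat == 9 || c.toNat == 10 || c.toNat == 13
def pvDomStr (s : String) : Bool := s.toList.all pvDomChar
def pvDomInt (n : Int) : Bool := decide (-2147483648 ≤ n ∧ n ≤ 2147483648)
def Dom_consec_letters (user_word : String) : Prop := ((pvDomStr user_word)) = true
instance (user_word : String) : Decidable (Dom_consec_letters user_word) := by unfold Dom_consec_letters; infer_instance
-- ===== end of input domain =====

-- B replaces A's positional ord-triple loop by generate-and-test over the distinct characters:
-- for each distinct c it checks whether the run c,c+1,c+2 occurs as a substring (alternative algorithm, same task).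

def pvMsgYes : String := "There are three consecutive letters in alphabetical order in the word "
def pvMsgNo : String := "There are NO three consecutive letters in alphabetical order in the word "

-- ===== PORT A =====
-- the for-loop with break: recursion over the range list; result "" means the break never fired.
-- indices pos, pos+1, pos+2 are always in range (pos < len-2), so pyGetD is exact here.
def consecLoopA (cs : List Char) : List Int → String
  | [] => ""
  | pos :: rest =>
    if ((PySem.List.pyGetD cs pos ' ').toNat : Int) + 1 = ((PySem.List.pyGetD cs (pos+1) ' ').toNat : Int)
       ∧ ((PySem.List.pyGetD cs (pos+1) ' ').toNat : Int) + 1 = ((PySem.List.pyGetD cs (pos+2) ' ').toNat : Int)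
    then pvMsgYes
    else consecLoopA cs rest

def consec_letters (user_word : String) : String :=
  let cs := user_word.toList
  let result := consecLoopA cs (PySem.List.pyRange 0 ((cs.length : Int) - 2) 1)
  if result = "" then pvMsgNo else result

-- ===== PORT B =====
-- the candidate run c, chr(ord(c)+1), chr(ord(c)+2); Char.ofNat is exact for chr on the ASCII domain
def pvRun (c : Char) : List Char := [c, Char.ofNat (c.toNat + 1), Char.ofNat (c.toNat + 2)]

-- for c in set(user_word): if run in user_word: return yes — recursion over the distinct-char set
def consecScanB (cs : List Char) : List Char → String
  | [] => pvMsgNo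
  | c :: rest => if PySem.Chars.isIn (pvRun c) cs then pvMsgYes else consecScanB cs rest

def consec_letters_alt (user_word : String) : String :=
  consecScanB user_word.toList (PySem.Set.ofList user_word.toList)

-- ===== PRECONDITION & SPEC =====
def Spec_consec_letters (user_word : String) (out : String) : Prop := out = consec_letters_alt user_word
instance (user_word : String) (out : String) : Decidable (Spec_consec_letters user_word out) := by unfold Spec_consec_letters; infer_instance

-- ===== CLAIM (what is proved, stated in full; the proofs are below) =====
def Claim_equal_consec_letters : Prop := ∀ (user_word : String), Dom_consec_letters user_word → Spec_consec_letters user_word (consec_letters user_word)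

-- ===== LEMMAS AND PROOFS =====

-- reference predicate: some triple of successive chars ascends by 1 twice
def pvAdj3 : List Char → Bool
  | a :: b :: c :: rest =>
    (((a.toNat : Int) + 1 == (b.toNat : Int)) && ((b.toNat : Int) + 1 == (c.toNat : Int)))
      || pvAdj3 (b :: c :: rest)
  | _ => false

theorem pvAdj3_short (l : List Char) (h : l.length ≤ 2) : pvAdj3 l = false := by
  match l, h with
  | [], _ => rfl
  | [_], _ => rfl
  | [_, _], _ => rfl

theorem pvLoop_aux (cs : List Char) : ∀ (n k : Nat), cs.length ≤ k + n →
    consecLoopA cs (PySem.List.pyRange (k : Int) ((cs.length : Int) - 2) 1)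
      = (if pvAdj3 (cs.drop k) then pvMsgYes else "") := by
  intro n
  induction n with
  | zero =>
    intro k hk
    rw [PySem.List.pyRange_one_eq_nil (by omega)]
    rw [List.drop_eq_nil_of_le (by omega)]
    rfl
  | succ n ih =>
    intro k hk
    by_cases h2 : (cs.length : Int) - 2 ≤ (k : Int)
    · rw [PySem.List.pyRange_one_eq_nil h2]
      rw [pvAdj3_short _ (by simp; omega)]
      rfl
    · have hk2 : k + 2 < cs.length := by omega
      have hk1 : k + 1 < cs.length := by omega
      have hk0 : k < cs.length := by omega
      rw [PySem.List.pyRange_one_cons (by omega)]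
      have e1 : (k : Int) + 1 = ((k + 1 : Nat) : Int) := by push_cast; ring
      have e2 : (k : Int) + 2 = ((k + 2 : Nat) : Int) := by push_cast; ring
      have hd0 := List.drop_eq_getElem_cons hk0
      have hd1 := List.drop_eq_getElem_cons hk1
      have hd2 := List.drop_eq_getElem_cons hk2
      rw [consecLoopA, e1, e2]
      simp only [PySem.List.pyGetD_natCast, List.getD_eq_getElem _ _ hk0,
        List.getD_eq_getElem _ _ hk1, List.getD_eq_getElem _ _ hk2]
      rw [hd0, hd1, hd2, pvAdj3]
      by_cases hc : ((cs[k].toNat : Int) + 1 = (cs[k+1].toNat : Int)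
          ∧ ((cs[k+1].toNat : Int) + 1 = (cs[k+2].toNat : Int)))
      · simp [hc.1, hc.2]
      · rw [if_neg hc]
        have := ih (k+1) (by omega)
        rw [hd1, hd2] at this
        rw [this]
        have hcb : (((cs[k].toNat : Int) + 1 == (cs[k+1].toNat : Int))
            && ((cs[k+1].toNat : Int) + 1 == (cs[k+2].toNat : Int))) = false := by
          simp only [Bool.and_eq_false_iff, beq_eq_false_iff_ne]
          by_cases h1 : (cs[k].toNat : Int) + 1 = (cs[k+1].toNat : Int)
          · exact Or.inr (fun h => hc ⟨h1, h⟩)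
          · exact Or.inl h1
        rw [hcb, Bool.false_or]

theorem pvLoop_eq (cs : List Char) :
    consecLoopA cs (PySem.List.pyRange 0 ((cs.length : Int) - 2) 1)
      = (if pvAdj3 cs then pvMsgYes else "") := by
  have h := pvLoop_aux cs cs.length 0 (by omega)
  simpa using h

-- chr is exact on the ASCII range
theorem pvOfNat_toNat (n : Nat) (h : n ≤ 128) : (Char.ofNat n).toNat = n := by
  have hv : n.isValidChar := Or.inl (by omega)
  simp [Char.ofNat, hv, Char.ofNatAux, Char.toNat]

-- pvAdj3 ↔ some char c of the list has its run [c,c+1,c+2] as an infix (on Dom-bounded lists)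
theorem pvAdj3_iff_run (cs : List Char) (hdom : ∀ c ∈ cs, c.toNat ≤ 126) :
    pvAdj3 cs = true ↔ ∃ c ∈ cs, pvRun c <:+: cs := by
  constructor
  · -- forward: find the ascending triple, it is the run of its first char
    intro h
    induction cs using pvAdj3.induct with
    | case1 a b c rest ih =>
      rw [pvAdj3, Bool.or_eq_true] at h
      cases h with
      | inl h =>
        simp only [Bool.and_eq_true, beq_iff_eq] at h
        have ha : a.toNat ≤ 126 := hdom a (by simp)
        refine ⟨a, by simp, ?_⟩
        have hb : Char.ofNat (a.toNat + 1) = b := by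
          have h1 := pvOfNat_toNat (a.toNat + 1) (by omega)
          rw [Char.ext_iff, ← UInt32.toNat_inj]
          show (Char.ofNat (a.toNat + 1)).toNat = b.toNat
          omega
        have hc : Char.ofNat (a.toNat + 2) = c := by
          have h2 := pvOfNat_toNat (a.toNat + 2) (by omega)
          rw [Char.ext_iff, ← UInt32.toNat_inj]
          show (Char.ofNat (a.toNat + 2)).toNat = c.toNat
          omega
        rw [pvRun, hb, hc]
        exact ⟨[], rest, rfl⟩
      | inr h =>
        obtain ⟨x, hx, hinf⟩ := ih (fun d hd => hdom d (List.mem_cons_of_mem a hd)) h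
        exact ⟨x, List.mem_cons_of_mem a hx, hinf.trans (List.suffix_cons a _).isInfix⟩
    | case2 l hne =>
      exfalso
      match l, hne, h with
      | [], _, h => exact absurd h (by decide)
      | [_], _, h => simp [pvAdj3] at h
      | [_, _], _, h => simp [pvAdj3] at h
      | a :: b :: c :: r, hne, _ => exact hne a b c r rfl
  · -- backward: an embedded run gives an ascending triple
    rintro ⟨c, hc, hinf⟩
    have hcb : c.toNat ≤ 126 := hdom c hc
    have h1 : (Char.ofNat (c.toNat + 1)).toNat = c.toNat + 1 := pvOfNat_toNat _ (by omega)
    have h2 : (Char.ofNat (c.toNat + 2)).toNat = c.toNat + 2 := pvOfNat_toNat _ (by omega)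
    clear hc
    induction cs with
    | nil => exact absurd hinf.length_le (by simp [pvRun])
    | cons a t ih =>
      rw [List.infix_cons_iff] at hinf
      cases hinf with
      | inl hpre =>
        obtain ⟨s, hs⟩ := hpre
        rw [pvRun] at hs
        match t, hs with
        | b :: d :: r, hs =>
          simp only [List.cons_append, List.nil_append, List.cons.injEq] at hs
          obtain ⟨ha, hb, hd, -⟩ := hs
          subst ha
          rw [pvAdj3, Bool.or_eq_true]
          left
          simp only [Bool.and_eq_true, beq_iff_eq, ← hb, ← hd, h1, h2]
          constructor <;> push_cast <;> ring
      | inr hinf =>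
        have ht := ih (fun d hd => hdom d (List.mem_cons_of_mem a hd)) hinf
        match t, ht with
        | b :: d :: r, ht => rw [pvAdj3, Bool.or_eq_true]; right; exact ht

-- B's scan over a candidate list returns yes iff some candidate's run is an infix
theorem pvScan_eq (cs : List Char) (l : List Char) :
    consecScanB cs l = (if ∃ c ∈ l, PySem.Chars.isIn (pvRun c) cs = true then pvMsgYes else pvMsgNo) := by
  induction l with
  | nil => simp [consecScanB]
  | cons c rest ih =>
    rw [consecScanB]
    by_cases h : PySem.Chars.isIn (pvRun c) cs = true
    · simp [h]
    · rw [if_neg h, ih]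
      by_cases h2 : ∃ x ∈ rest, PySem.Chars.isIn (pvRun x) cs = true
      · rw [if_pos h2, if_pos ⟨h2.choose, List.mem_cons_of_mem c h2.choose_spec.1, h2.choose_spec.2⟩]
      · rw [if_neg h2, if_neg]
        rintro ⟨x, hx, hrun⟩
        rcases List.mem_cons.mp hx with rfl | hx'
        · exact h hrun
        · exact h2 ⟨x, hx', hrun⟩

-- ===== VERDICT (by name: the statement is the Claim_ definition above) =====
theorem consec_letters_spec : Claim_equal_consec_letters := by
  intro u hdom
  have hbound : ∀ c ∈ u.toList, c.toNat ≤ 126 := by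
    intro c hc
    have := List.all_eq_true.mp hdom c hc
    simp only [pvDomChar, Bool.or_eq_true, Bool.and_eq_true, decide_eq_true_eq, beq_iff_eq] at this
    omega
  have hiff : (∃ c ∈ PySem.Set.ofList u.toList, PySem.Chars.isIn (pvRun c) u.toList = true)
      ↔ pvAdj3 u.toList = true := by
    constructor
    · rintro ⟨c, hc, hrun⟩
      exact (pvAdj3_iff_run u.toList hbound).mpr
        ⟨c, (PySem.Set.mem_ofList _ _).mp hc, (PySem.Chars.isIn_iff_infix _ _).mp hrun⟩
    · intro h
      obtain ⟨c, hc, hinf⟩ := (pvAdj3_iff_run u.toList hbound).mp h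
      exact ⟨c, (PySem.Set.mem_ofList _ _).mpr hc, (PySem.Chars.isIn_iff_infix _ _).mpr hinf⟩
  unfold Spec_consec_letters consec_letters consec_letters_alt
  simp only [pvScan_eq, pvLoop_eq]
  by_cases h : pvAdj3 u.toList = true
  · rw [if_pos h, if_neg (by decide : ¬ (pvMsgYes = "")), if_pos (hiff.mpr h)]
  · rw [if_neg h, if_pos rfl, if_neg (fun hx => h (hiff.mp hx))]
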